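-- pv_equiv track=rewrite | github.com/ederror/algorithm-study | Baekjoon/14500.py | flip
-- ===== SOURCE A (Python) =====
-- def flip(block):
--     fblock = []
--     cMin = 4
--     for x, y in block:
--         fblock.append([x, 3-y])
--         if cMin > 3-y:
--             cMin = 3-y
--     for i, b in enumerate(fblock):
--         fblock[i] = [b[0], b[1]-cMin]
--     return fblock
-- ===== SOURCE B (Python) =====
-- def flip(block):
--     m = max((y for x, y in block), default=0)
--     return [[x, m - y] for x, y in block]
-- ===== Notes on version B (the rewrite author's own statement) =====
-- stated objective: simpler
-- what changed: Replaces A's two-pass flip-then-renormalize (append [x,3-y] while tracking a running minimum seeded with the sentinel 4, then a second in-place subtraction pass) with a single comprehension [x, max_y - y] after one max computation, using the algebraic identity (3-y) - min(3-y') = max(y') - y.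
-- intended difference: On nonempty blocks whose y-coordinates are all < -1, A's sentinel cMin=4 never updates so A returns [x, -1-y] (not normalized to minimum 0), while B returns the intended normalized [x, max_y - y] whose minimum second coordinate is 0. — e.g. on flip([[0, -2]]): A returns [[0, 1]], B returns [[0, 0]]
import Mathlib
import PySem

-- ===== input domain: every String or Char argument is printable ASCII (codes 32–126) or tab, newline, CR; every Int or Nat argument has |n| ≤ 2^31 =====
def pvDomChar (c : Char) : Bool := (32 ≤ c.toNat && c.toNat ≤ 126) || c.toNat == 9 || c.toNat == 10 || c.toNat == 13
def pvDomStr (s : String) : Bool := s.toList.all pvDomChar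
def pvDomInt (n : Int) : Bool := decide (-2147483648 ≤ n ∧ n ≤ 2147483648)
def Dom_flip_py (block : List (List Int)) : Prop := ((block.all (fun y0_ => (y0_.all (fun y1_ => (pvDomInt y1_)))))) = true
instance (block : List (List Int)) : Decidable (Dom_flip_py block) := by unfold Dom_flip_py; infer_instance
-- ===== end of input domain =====

-- B changes only one corner: A's sentinel cMin=4 leaves blocks with all y < -1 unnormalized; B normalizes them (see D_flip_py).

-- ===== PORT A =====
-- step for step: first loop appends [x, 3-y] and tracks the running minimum seeded with 4;
-- second loop rewrites each entry to [b[0], b[1]-cMin]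
def flip_py (block : List (List Int)) : List (List Int) :=
  let st := block.foldl
    (fun (st : List (List Int) × Int) row =>
      match row with
      | x :: y :: _ =>
        (st.1 ++ [[x, 3 - y]], if st.2 > 3 - y then 3 - y else st.2)
      | _ => st)   -- rows without two entries raise in Python; excluded by Pre_
    ([], 4)
  st.1.map (fun b => [b.getD 0 0, b.getD 1 0 - st.2])

-- ===== PORT B =====
-- m = max((y for x, y in block), default=0); [[x, m - y] for x, y in block]
def flip_py_alt (block : List (List Int)) : List (List Int) :=
  let m : Int :=
    match PySem.List.max? (block.map (fun r => r.getD 1 0)) (fun v => v) with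
    | some v => v
    | none => 0
  block.map (fun r => [r.getD 0 0, m - r.getD 1 0])

-- ===== PRECONDITION & SPEC =====
-- Pre_ excludes rows that are not pairs: 'for x, y in block' raises ValueError on them.
def Pre_flip_py (block : List (List Int)) : Prop := ∀ r ∈ block, r.length = 2
instance (block : List (List Int)) : Decidable (Pre_flip_py block) := by unfold Pre_flip_py; infer_instance
def pvWitness_flip_py : List (List Int) := [[0, 1], [2, 3]]

-- On nonempty blocks whose y-coordinates are all < -1, A's sentinel cMin=4 never updates so A returns
-- [x, -1-y] (not normalized), while B returns the intended normalized [x, max_y - y].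
def D_flip_py (block : List (List Int)) : Prop :=
  block ≠ [] ∧ ∀ r ∈ block, r.getD 1 0 < -1
instance (block : List (List Int)) : Decidable (D_flip_py block) := by unfold D_flip_py; infer_instance

def Spec_flip_py (block : List (List Int)) (out : List (List Int)) : Prop :=
  ¬ D_flip_py block → out = flip_py_alt block
instance (block : List (List Int)) (out : List (List Int)) : Decidable (Spec_flip_py block out) := by unfold Spec_flip_py; infer_instance

def pvDiffWitness_flip_py : List (List Int) := [[0, -2]]
def pvDiffWitnessOut_flip_py : (List (List Int)) × (List (List Int)) := ([[0, 1]], [[0, 0]])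

-- ===== CLAIM =====
def Claim_unchanged_flip_py : Prop := ∀ (block : List (List Int)), Dom_flip_py block → Pre_flip_py block → Spec_flip_py block (flip_py block)
def Claim_changed_flip_py : Prop := Dom_flip_py (pvDiffWitness_flip_py) ∧ Pre_flip_py (pvDiffWitness_flip_py) ∧ D_flip_py (pvDiffWitness_flip_py) ∧ flip_py (pvDiffWitness_flip_py) = pvDiffWitnessOut_flip_py.1 ∧ flip_py_alt (pvDiffWitness_flip_py) = pvDiffWitnessOut_flip_py.2 ∧ pvDiffWitnessOut_flip_py.1 ≠ pvDiffWitnessOut_flip_py.2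
def Claim_exact_flip_py : Prop := ∀ (block : List (List Int)), Dom_flip_py block → Pre_flip_py block → D_flip_py block → flip_py block ≠ flip_py_alt block

-- ===== LEMMAS AND PROOFS =====

-- the first loop of A, characterised: output list is a map, accumulator is a running minimum
lemma flip_fold (block : List (List Int)) (hpre : ∀ r ∈ block, r.length = 2) :
    ∀ (acc : List (List Int)) (a : Int),
    block.foldl
      (fun (st : List (List Int) × Int) row =>
        match row with
        | x :: y :: _ =>
          (st.1 ++ [[x, 3 - y]], if st.2 > 3 - y then 3 - y else st.2)
        | _ => st) (acc, a)
    = (acc ++ block.map (fun r => [r.getD 0 0, 3 - r.getD 1 0]),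
       block.foldl (fun a r => min a (3 - r.getD 1 0)) a) := by
  induction block with
  | nil => intro acc a; simp
  | cons r t ih =>
    intro acc a
    have hr : r.length = 2 := hpre r (by simp)
    match r, hr with
    | [x, y], _ =>
      simp only [List.foldl_cons]
      rw [ih (fun r hr => hpre r (by simp [hr]))]
      simp [List.getD]
      congr 1
      split_ifs <;> omega

-- A's result as a single map over the block
lemma flip_py_map (block : List (List Int)) (hpre : ∀ r ∈ block, r.length = 2) :
    flip_py block
    = block.map (fun r => [r.getD 0 0,
        3 - r.getD 1 0 - block.foldl (fun a r => min a (3 - r.getD 1 0)) 4]) := by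
  unfold flip_py
  rw [flip_fold block hpre]
  simp [List.map_map, Function.comp, List.getD]

lemma foldl_min_flip (l : List Int) : ∀ b : Int,
    l.foldl (fun a y => min a (3 - y)) (3 - b) = 3 - l.foldl max b := by
  induction l with
  | nil => intro b; simp
  | cons y t ih =>
    intro b
    have h : min (3 - b) (3 - y) = 3 - max b y := by omega
    simp only [List.foldl_cons, h, ih]

lemma foldl_max_pull (t : List Int) : ∀ a b : Int,
    t.foldl max (max a b) = max a (t.foldl max b) := by
  induction t with
  | nil => intro a b; simp
  | cons c t ih =>
    intro a b
    simp only [List.foldl_cons, max_assoc, ih]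

-- A's running minimum over rows equals the same fold over the y-coordinates
lemma foldl_rows_ys (block : List (List Int)) (a : Int) :
    block.foldl (fun a r => min a (3 - r.getD 1 0)) a
    = (block.map (fun r => r.getD 1 0)).foldl (fun a y => min a (3 - y)) a := by
  induction block generalizing a with
  | nil => rfl
  | cons r t ih => simp only [List.map_cons, List.foldl_cons, ih]

lemma cMin_eq (block : List (List Int)) :
    block.foldl (fun a r => min a (3 - r.getD 1 0)) 4
    = 3 - max (-1) ((block.map (fun r => r.getD 1 0)).foldl max (-1)) := by
  rw [foldl_rows_ys]
  have h4 : (4 : Int) = 3 - (-1) := by norm_num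
  rw [h4, foldl_min_flip]
  have : ((block.map fun r => r.getD 1 0).foldl max (-1))
      = max (-1) ((block.map fun r => r.getD 1 0).foldl max (-1)) := by
    cases hl : block.map (fun r => r.getD 1 0) with
    | nil => simp
    | cons y t =>
      simp only [List.foldl_cons]
      have : max (-1 : Int) y = max (-1) (max (-1) y) := by omega
      rw [this, foldl_max_pull, foldl_max_pull]
      omega
  omega

lemma max?_head_cons (y : Int) (t : List Int) :
    PySem.List.max? (y :: t) (fun v => v) = some (t.foldl max y) :=
  PySem.List.max?_id_cons y t

theorem flip_py_spec : Claim_unchanged_flip_py := by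
  intro block _ hpre hnd
  cases block with
  | nil => rfl
  | cons r t =>
    have halt : flip_py_alt (r :: t)
        = (r :: t).map (fun rr => [rr.getD 0 0,
            (t.map (fun r => r.getD 1 0)).foldl max (r.getD 1 0) - rr.getD 1 0]) := by
      unfold flip_py_alt
      simp only [List.map_cons, max?_head_cons]
    -- ¬D on a nonempty block: some row has y ≥ -1, so the max is ≥ -1
    have hex : ∃ s ∈ r :: t, -1 ≤ s.getD 1 0 := by
      unfold D_flip_py at hnd
      push Not at hnd
      obtain ⟨s, hs, h⟩ := hnd (by simp)
      exact ⟨s, hs, by omega⟩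
    obtain ⟨s, hs, hsy⟩ := hex
    have hm : s.getD 1 0 ≤ (t.map (fun r => r.getD 1 0)).foldl max (r.getD 1 0) := by
      have := PySem.List.max?_isMax (xs := (r :: t).map (fun r => r.getD 1 0))
        (key := fun v => v) (m := (t.map (fun r => r.getD 1 0)).foldl max (r.getD 1 0))
        (by simp only [List.map_cons, max?_head_cons])
      exact this _ (List.mem_map_of_mem hs)
    -- A's running minimum equals 3 - (that max)
    have hpull : ((r :: t).map (fun r => r.getD 1 0)).foldl max (-1)
        = max (-1) ((t.map (fun r => r.getD 1 0)).foldl max (r.getD 1 0)) := by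
      simp only [List.map_cons, List.foldl_cons]
      rw [show max (-1 : Int) (r.getD 1 0) = max (-1) (max (-1) (r.getD 1 0)) by omega,
        foldl_max_pull, foldl_max_pull]
      omega
    have hc : (r :: t).foldl (fun a r => min a (3 - r.getD 1 0)) 4
        = 3 - (t.map (fun r => r.getD 1 0)).foldl max (r.getD 1 0) := by
      rw [cMin_eq (r :: t), hpull]
      omega
    rw [flip_py_map _ hpre, halt, hc]
    apply List.map_congr_left
    intro x _
    simp only [List.cons.injEq, and_true, true_and]
    omega

theorem flip_py_changed : Claim_changed_flip_py := by
  unfold Claim_changed_flip_py; decide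

lemma foldl_max_neg (l : List Int) (h : ∀ y ∈ l, y < -1) : l.foldl max (-1) = -1 := by
  induction l with
  | nil => simp
  | cons y u ih =>
    simp only [List.foldl_cons]
    have hy := h y (by simp)
    rw [show max (-1 : Int) y = -1 by omega]
    exact ih (fun z hz => h z (by simp [hz]))

theorem flip_py_tight : Claim_exact_flip_py := by
  intro block _ hpre hd heq
  obtain ⟨hne, hall⟩ := hd
  cases hb : block with
  | nil => exact hne hb
  | cons r t =>
    subst hb
    rw [flip_py_map _ hpre] at heq
    unfold flip_py_alt at heq
    simp only [List.map_cons, max?_head_cons, List.cons.injEq] at heq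
    obtain ⟨h1, _⟩ := heq
    -- inside D the running minimum stays at the sentinel 4
    have hfold : ((r :: t).map (fun r => r.getD 1 0)).foldl max (-1) = -1 :=
      foldl_max_neg _ (fun y hy => by
        obtain ⟨s, hs, rfl⟩ := List.mem_map.mp hy
        exact hall s hs)
    have hc := cMin_eq (r :: t)
    rw [hfold] at hc
    -- B's maximum is an element, hence < -1
    have hm : (t.map (fun r => r.getD 1 0)).foldl max (r.getD 1 0) < -1 := by
      have hmem := PySem.List.max?_mem (xs := (r :: t).map (fun r => r.getD 1 0))
        (key := fun v => v) (m := (t.map (fun r => r.getD 1 0)).foldl max (r.getD 1 0))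
        (by simp only [List.map_cons, max?_head_cons])
      obtain ⟨s, hs, hsv⟩ := List.mem_map.mp hmem
      exact hsv ▸ hall s hs
    rw [show (3 : Int) - max (-1) (-1) = 4 by norm_num] at hc
    rw [hc] at h1
    simp only [and_true, true_and] at h1
    omega
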